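-- pv_equiv track=rewrite | github.com/proggeguden/nmiai | astar-island/predictor.py | _precompute_cluster_density
-- ===== SOURCE A (Python) =====
-- def _precompute_cluster_density(initial_grid):
--     """Count settlements within Manhattan distance 5 of each cell.
--
--     Returns H×W list of lists: True if ≥2 settlements within d≤5, else False.
--     """
--     H = len(initial_grid)
--     W = len(initial_grid[0])
--     settlements = []
--     for r in range(H):
--         for c in range(W):
--             if initial_grid[r][c] in (1, 2):
--                 settlements.append((r, c))
--
--     cluster = [[False] * W for _ in range(H)]
--     for r in range(H):
--         for c in range(W):
--             count = 0
--             for sr, sc in settlements: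
--                 if abs(r - sr) + abs(c - sc) <= 5:
--                     count += 1
--                     if count >= 2:
--                         cluster[r][c] = True
--                         break
--     return cluster
-- ===== SOURCE B (Python) =====
-- def _precompute_cluster_density(initial_grid):
--     """Count settlements within Manhattan distance 5 of each cell.
--
--     Scatter version: each settlement increments a count grid over its
--     constant-size distance-5 diamond; a cell is clustered iff count >= 2.
--     """
--     H = len(initial_grid)
--     W = len(initial_grid[0])
--     counts = [[0] * W for _ in range(H)]
--     for r in range(H):
--         for c in range(W):
--             if initial_grid[r][c] in (1, 2):
--                 for dr in range(-5, 6):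
--                     rr = r + dr
--                     if 0 <= rr < H:
--                         rem = 5 - abs(dr)
--                         for dc in range(-rem, rem + 1):
--                             cc = c + dc
--                             if 0 <= cc < W:
--                                 counts[rr][cc] += 1
--     return [[counts[r][c] >= 2 for c in range(W)] for r in range(H)]
-- ===== Notes on version B (the rewrite author's own statement) =====
-- stated objective: faster
-- what changed: Instead of scanning the whole settlement list for every cell (O(H*W*S)), B scatters each settlement over its constant-size distance-5 diamond into a count grid and thresholds count >= 2 (O(S + H*W)).
import Mathlib
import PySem

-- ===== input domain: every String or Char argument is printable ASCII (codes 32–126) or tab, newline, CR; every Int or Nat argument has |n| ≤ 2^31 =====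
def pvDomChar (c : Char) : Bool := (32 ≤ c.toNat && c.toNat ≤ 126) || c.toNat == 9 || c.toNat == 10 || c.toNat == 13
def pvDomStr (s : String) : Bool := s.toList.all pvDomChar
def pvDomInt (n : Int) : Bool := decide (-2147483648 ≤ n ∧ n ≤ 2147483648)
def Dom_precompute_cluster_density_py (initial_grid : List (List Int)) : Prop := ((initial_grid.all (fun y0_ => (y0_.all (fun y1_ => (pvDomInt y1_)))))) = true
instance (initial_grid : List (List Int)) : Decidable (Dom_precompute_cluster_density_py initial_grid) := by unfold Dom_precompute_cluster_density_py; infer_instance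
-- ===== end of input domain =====

-- B replaces A's per-cell scan of the whole settlement list by scattering each
-- settlement over its constant-size distance-5 diamond into a count grid (objective: faster).

-- ===== PORT A =====
-- inner 'for sr, sc in settlements' loop of A with its early break, as a fold over (count, done)

def pvAStep (r c : Nat) (st : Nat × Bool) (s : Nat × Nat) : Nat × Bool :=
  if st.2 then st
  else if |(r : Int) - s.1| + |(c : Int) - s.2| ≤ 5 then
    if st.1 + 1 ≥ 2 then (st.1 + 1, true) else (st.1 + 1, false)
  else st

def precompute_cluster_density_py (initial_grid : List (List Int)) : List (List Bool) :=
  let H := initial_grid.length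
  let W := (initial_grid.getD 0 []).length
  let settlements : List (Nat × Nat) :=
    (List.range H).foldl (fun acc r =>
      (List.range W).foldl (fun acc c =>
        if (initial_grid.getD r []).getD c 0 = 1 ∨ (initial_grid.getD r []).getD c 0 = 2
        then acc ++ [(r, c)] else acc) acc) []
  (List.range H).map (fun r => (List.range W).map (fun c =>
    (settlements.foldl (pvAStep r c) (0, false)).2))

-- ===== PORT B =====
-- counts[rr][cc] += 1

def pvBump (cs : List (List Int)) (rr cc : Nat) : List (List Int) :=
  cs.modify rr (fun row => row.modify cc (· + 1))

-- the two inner diamond loops of B for one settlement (r, c)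

def pvScatter (H W : Nat) (cs : List (List Int)) (r c : Nat) : List (List Int) :=
  (PySem.List.pyRange (-5) 6 1).foldl (fun cs dr =>
    let rr := (r : Int) + dr
    if 0 ≤ rr ∧ rr < (H : Int) then
      let rem : Int := 5 - |dr|
      (PySem.List.pyRange (-rem) (rem + 1) 1).foldl (fun cs dc =>
        let cc := (c : Int) + dc
        if 0 ≤ cc ∧ cc < (W : Int) then pvBump cs rr.toNat cc.toNat else cs) cs
    else cs) cs

def precompute_cluster_density_py_alt (initial_grid : List (List Int)) : List (List Bool) :=
  let H := initial_grid.length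
  let W := (initial_grid.getD 0 []).length
  let counts : List (List Int) :=
    (List.range H).foldl (fun cs r =>
      (List.range W).foldl (fun cs c =>
        if (initial_grid.getD r []).getD c 0 = 1 ∨ (initial_grid.getD r []).getD c 0 = 2
        then pvScatter H W cs r c else cs) cs)
      (List.replicate H (List.replicate W (0 : Int)))
  (List.range H).map (fun r => (List.range W).map (fun c =>
    decide ((counts.getD r []).getD c 0 ≥ 2)))

-- ===== PRECONDITION & SPEC =====
-- A raises IndexError on the empty grid (initial_grid[0]) and on grids having some row
-- shorter than the first row; Pre_ excludes exactly those inputs.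
def Pre_precompute_cluster_density_py (initial_grid : List (List Int)) : Prop :=
  initial_grid ≠ [] ∧ ∀ row ∈ initial_grid, (initial_grid.getD 0 []).length ≤ row.length
instance (initial_grid : List (List Int)) : Decidable (Pre_precompute_cluster_density_py initial_grid) := by unfold Pre_precompute_cluster_density_py; infer_instance
def pvWitness_precompute_cluster_density_py : List (List Int) := [[1, 0], [0, 2]]

def Spec_precompute_cluster_density_py (initial_grid : List (List Int)) (out : List (List Bool)) : Prop := out = precompute_cluster_density_py_alt initial_grid
instance (initial_grid : List (List Int)) (out : List (List Bool)) : Decidable (Spec_precompute_cluster_density_py initial_grid out) := by unfold Spec_precompute_cluster_density_py; infer_instance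

-- ===== CLAIM (what is proved, stated in full; the proofs are below) =====
def Claim_equal_precompute_cluster_density_py : Prop := ∀ (initial_grid : List (List Int)), Dom_precompute_cluster_density_py initial_grid → Pre_precompute_cluster_density_py initial_grid → Spec_precompute_cluster_density_py initial_grid (precompute_cluster_density_py initial_grid)

-- ===== LEMMAS AND PROOFS =====
-- entry (r, c) of a count grid

def pvGet2 (cs : List (List Int)) (r c : Nat) : Int := (cs.getD r []).getD c 0

-- settlement s is within Manhattan distance 5 of cell (r, c)

def pvNear (r c : Nat) (s : Nat × Nat) : Bool := decide (|(r : Int) - s.1| + |(c : Int) - s.2| ≤ 5)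

-- shape of a count grid

def pvShape (H W : Nat) (cs : List (List Int)) : Prop :=
  cs.length = H ∧ ∀ row ∈ cs, row.length = W

theorem pvA_frozen (r c : Nat) (l : List (Nat × Nat)) (k : Nat) :
    l.foldl (pvAStep r c) (k, true) = (k, true) := by
  induction l with
  | nil => rfl
  | cons s t ih => simpa [pvAStep] using ih

theorem pvA_aux (r c : Nat) (l : List (Nat × Nat)) (k : Nat) (hk : k < 2) :
    l.foldl (pvAStep r c) (k, false) =
      if 2 ≤ k + l.countP (pvNear r c) then (2, true) else (k + l.countP (pvNear r c), false) := by
  induction l generalizing k with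
  | nil => simp; omega
  | cons s t ih =>
    by_cases hn : pvNear r c s = true
    · have hd : |(r : Int) - s.1| + |(c : Int) - s.2| ≤ 5 := by simpa [pvNear] using hn
      by_cases hk1 : k + 1 ≥ 2
      · have hk2 : k = 1 := by omega
        simp [List.foldl_cons, pvAStep, hd, hk2, pvA_frozen, hn]
      · simp only [List.foldl_cons, pvAStep, hd, hk1, Bool.false_eq_true, if_true, if_false]
        rw [ih (k + 1) (by omega)]
        have : k + 1 + List.countP (pvNear r c) t = k + List.countP (pvNear r c) (s :: t) := by
          simp [List.countP_cons, hn]; omega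
        rw [this]
    · have hd : ¬ (|(r : Int) - s.1| + |(c : Int) - s.2| ≤ 5) := by simpa [pvNear] using hn
      simp only [List.foldl_cons, pvAStep, hd, Bool.false_eq_true, if_false]
      rw [ih k hk]
      simp [List.countP_cons, hn]

theorem pvA_break (r c : Nat) (l : List (Nat × Nat)) :
    (l.foldl (pvAStep r c) (0, false)).2 = decide (2 ≤ l.countP (pvNear r c)) := by
  rw [pvA_aux r c l 0 (by omega)]
  by_cases h : 2 ≤ l.countP (pvNear r c)
  · simp [h]
  · simp only [Nat.zero_add, if_neg h]
    simp [h]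

theorem pvGetD_modify (α : Type) (l : List α) (i r : Nat) (f : α → α) (d : α) :
    (l.modify i f).getD r d = if i = r ∧ r < l.length then f (l.getD r d) else l.getD r d := by
  rcases Nat.lt_or_ge r l.length with h | h
  · have h' : r < (l.modify i f).length := by simpa [List.length_modify] using h
    rw [List.getD_eq_getElem?_getD, List.getElem?_modify]
    by_cases hi : i = r <;> simp [hi, h, List.getElem?_eq_getElem, List.getD_eq_getElem?_getD]
  · have h1 : l[r]? = none := List.getElem?_eq_none h
    have h2 : (l.modify i f)[r]? = none := List.getElem?_eq_none (by simpa [List.length_modify] using h)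
    simp [List.getD_eq_getElem?_getD, h1, h2]
    omega

theorem pvGet2_bump (cs : List (List Int)) (i j r c : Nat) :
    pvGet2 (pvBump cs i j) r c =
      pvGet2 cs r c + (if r = i ∧ c = j ∧ i < cs.length ∧ j < (cs.getD i []).length then 1 else 0) := by
  unfold pvGet2 pvBump
  rw [pvGetD_modify]
  by_cases hi : i = r ∧ r < cs.length
  · rw [if_pos hi]
    rw [pvGetD_modify]
    obtain ⟨hi1, hi2⟩ := hi
    subst hi1
    by_cases hj : j = c ∧ c < (cs.getD i []).length
    · rw [if_pos hj]
      rw [if_pos ⟨rfl, hj.1.symm, hi2, hj.1 ▸ hj.2⟩]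
    · rw [if_neg hj, if_neg]
      · omega
      · rintro ⟨-, h2, -, h4⟩; exact hj ⟨h2.symm, h2 ▸ h4⟩
  · rw [if_neg hi, if_neg]
    · omega
    · rintro ⟨h1, -, h3, -⟩; exact hi ⟨h1.symm, h1 ▸ h3⟩

theorem pvShape_bump (H W : Nat) (cs : List (List Int)) (i j : Nat) (h : pvShape H W cs) :
    pvShape H W (pvBump cs i j) := by
  obtain ⟨h1, h2⟩ := h
  refine ⟨by simpa [pvBump, List.length_modify] using h1, ?_⟩
  intro row hrow
  obtain ⟨k, hk, hkeq⟩ := List.mem_iff_getElem.mp hrow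
  simp only [pvBump] at hkeq hk
  rw [List.getElem_modify] at hkeq
  have hk' : k < cs.length := by simpa [List.length_modify] using hk
  by_cases hik : i = k
  · rw [if_pos hik] at hkeq
    rw [← hkeq, List.length_modify]
    exact h2 _ (List.getElem_mem hk')
  · rw [if_neg hik] at hkeq
    exact hkeq ▸ h2 _ (List.getElem_mem hk')

theorem pvFoldl_inv {α β : Type} (P : β → Prop) (f : β → α → β) (l : List α) (b : β)
    (hb : P b) (hf : ∀ b a, P b → P (f b a)) : P (l.foldl f b) := by
  induction l generalizing b with
  | nil => exact hb
  | cons x t ih => exact ih _ (hf _ _ hb)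

-- in-range bump adds exactly one at its own cell
theorem pvGet2_bump_shape (H W : Nat) (cs : List (List Int)) (i j r c : Nat)
    (h : pvShape H W cs) (hi : i < H) (hj : j < W) :
    pvGet2 (pvBump cs i j) r c = pvGet2 cs r c + (if r = i ∧ c = j then 1 else 0) := by
  obtain ⟨h1, h2⟩ := h
  rw [pvGet2_bump]
  congr 1
  by_cases hij : r = i ∧ c = j
  · rw [if_pos hij, if_pos]
    refine ⟨hij.1, hij.2, h1 ▸ hi, ?_⟩
    rw [List.getD_eq_getElem?_getD, List.getElem?_eq_getElem (h1 ▸ hi)]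
    simp only [Option.getD_some]
    rw [h2 _ (List.getElem_mem _)]
    exact hj
  · rw [if_neg hij, if_neg]
    rintro ⟨ha, hb, -, -⟩; exact hij ⟨ha, hb⟩

-- the inner (dc) loop counts one hit at (R, c) iff c - sc is in the dc list
theorem pvInner (H W R sc : Nat) (hR : R < H) (dcs : List Int) (hnd : dcs.Nodup)
    (cs : List (List Int)) (h : pvShape H W cs) (r c : Nat) :
    pvGet2 (dcs.foldl (fun cs dc =>
        if 0 ≤ (sc : Int) + dc ∧ (sc : Int) + dc < (W : Int) then
          pvBump cs R ((sc : Int) + dc).toNat else cs) cs) r c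
      = pvGet2 cs r c + (if r = R ∧ c < W ∧ ((c : Int) - sc) ∈ dcs then 1 else 0) := by
  induction dcs generalizing cs with
  | nil => simp
  | cons d t ih =>
    rw [List.foldl_cons]
    rcases List.nodup_cons.mp hnd with ⟨hd, hnd'⟩
    by_cases hc : 0 ≤ (sc : Int) + d ∧ (sc : Int) + d < (W : Int)
    · rw [if_pos hc]
      have hsh' := pvShape_bump H W cs R ((sc : Int) + d).toNat h
      rw [ih hnd' _ hsh']
      rw [pvGet2_bump_shape H W cs R _ r c h hR (by omega)]
      by_cases hdc : d = (c : Int) - sc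
      · have hnt : ¬ ((c : Int) - sc) ∈ t := by rw [← hdc]; exact hd
        by_cases hr : r = R ∧ c < W
        · have heq : c = ((sc : Int) + d).toNat := by omega
          have hmc : ((c : Int) - (sc : Int)) ∈ (d :: t) := by rw [List.mem_cons]; left; omega
          rw [if_pos ⟨hr.1, heq⟩, if_neg (fun hx => hnt hx.2.2), if_pos ⟨hr.1, hr.2, hmc⟩]
          omega
        · have hne : ¬ (r = R ∧ c = ((sc : Int) + d).toNat) := by
            rintro ⟨h1, h2⟩; exact hr ⟨h1, by omega⟩
          simp only [hne, if_neg, if_false]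
          have : ¬ (r = R ∧ c < W ∧ ((c : Int) - sc) ∈ (d :: t)) := by
            rintro ⟨h1, h2, h3⟩
            rcases List.mem_cons.mp h3 with h4 | h4
            · exact hne ⟨h1, by omega⟩
            · exact hnt h4
          simp only [hnt, if_neg, if_false, this]
          simp
      · have hne : ¬ (r = R ∧ c = ((sc : Int) + d).toNat) := by
          rintro ⟨-, h2⟩; exact hdc (by omega)
        have hmem : (((c : Int) - sc) ∈ (d :: t)) ↔ (((c : Int) - sc) ∈ t) := by
          simp only [List.mem_cons, or_iff_right_iff_imp]
          intro h; exact absurd h.symm hdc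
        simp only [hne, if_neg, if_false, hmem]
        omega
    · rw [if_neg hc]
      rw [ih hnd' _ h]
      congr 1
      by_cases hdc : d = (c : Int) - sc
      · have hcW : ¬ (c < W) := by omega
        simp [hcW]
      · have hmem : (((c : Int) - sc) ∈ (d :: t)) ↔ (((c : Int) - sc) ∈ t) := by
          simp only [List.mem_cons, or_iff_right_iff_imp]
          intro h; exact absurd h.symm hdc
        simp only [hmem]

theorem pvShape_inner (H W R sc : Nat) (dcs : List Int) (cs : List (List Int)) (h : pvShape H W cs) :
    pvShape H W (dcs.foldl (fun cs dc =>
      if 0 ≤ (sc : Int) + dc ∧ (sc : Int) + dc < (W : Int) then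
        pvBump cs R ((sc : Int) + dc).toNat else cs) cs) := by
  refine pvFoldl_inv (pvShape H W) _ dcs cs h ?_
  intro b a hb
  dsimp only
  split_ifs with h1
  · exact pvShape_bump H W b R _ hb
  · exact hb

theorem pvShape_scatter (H W : Nat) (cs : List (List Int)) (sr sc : Nat) (h : pvShape H W cs) :
    pvShape H W (pvScatter H W cs sr sc) := by
  refine pvFoldl_inv (pvShape H W) _ _ cs h ?_
  intro b a hb
  dsimp only
  split_ifs with h1
  · exact pvShape_inner H W _ sc _ b hb
  · exact hb

theorem pvOuter (H W sr sc : Nat) (drs : List Int) (hnd : drs.Nodup)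
    (cs : List (List Int)) (h : pvShape H W cs) (r c : Nat) :
    pvGet2 (drs.foldl (fun cs dr =>
      let rr := (sr : Int) + dr
      if 0 ≤ rr ∧ rr < (H : Int) then
        let rem : Int := 5 - |dr|
        (PySem.List.pyRange (-rem) (rem + 1) 1).foldl (fun cs dc =>
          let cc := (sc : Int) + dc
          if 0 ≤ cc ∧ cc < (W : Int) then pvBump cs rr.toNat cc.toNat else cs) cs
      else cs) cs) r c
    = pvGet2 cs r c + (if r < H ∧ c < W ∧ ((r : Int) - sr) ∈ drs ∧ |(c : Int) - sc| ≤ 5 - |(r : Int) - sr| then 1 else 0) := by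
  induction drs generalizing cs with
  | nil => simp
  | cons d t ih =>
    rcases List.nodup_cons.mp hnd with ⟨hd, hnd'⟩
    rw [List.foldl_cons]
    dsimp only
    by_cases hc : 0 ≤ (sr : Int) + d ∧ (sr : Int) + d < (H : Int)
    · rw [if_pos hc]
      have hsh' := pvShape_inner H W ((sr : Int) + d).toNat sc (PySem.List.pyRange (-(5 - |d|)) ((5 - |d|) + 1) 1) cs h
      rw [ih hnd' _ hsh']
      rw [pvInner H W ((sr : Int) + d).toNat sc (by omega) _ (PySem.List.nodup_pyRange_one _ _) cs h r c]
      by_cases hdr : d = (r : Int) - sr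
      · have hrR : r = ((sr : Int) + d).toNat := by omega
        have hrH : r < H := by omega
        have hnt : ((r : Int) - sr) ∉ t := by rw [← hdr]; exact hd
        have ht0 : ¬ (r < H ∧ c < W ∧ ((r : Int) - sr) ∈ t ∧ |(c : Int) - sc| ≤ 5 - |(r : Int) - sr|) :=
          fun hx => hnt hx.2.2.1
        rw [if_neg ht0]
        by_cases hcw : c < W ∧ |(c : Int) - sc| ≤ 5 - |(r : Int) - sr|
        · have hmem : ((c : Int) - sc) ∈ PySem.List.pyRange (-(5 - |d|)) ((5 - |d|) + 1) 1 := by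
            rw [PySem.List.mem_pyRange_one, hdr]
            have h5 := hcw.2
            simp only [Int.abs_eq_natAbs] at h5 ⊢
            omega
          rw [if_pos ⟨hrR, hcw.1, hmem⟩,
              if_pos ⟨hrH, hcw.1, List.mem_cons.mpr (Or.inl hdr.symm), hcw.2⟩]
          omega
        · have h1 : ¬ (r = ((sr : Int) + d).toNat ∧ c < W ∧ ((c : Int) - sc) ∈ PySem.List.pyRange (-(5 - |d|)) ((5 - |d|) + 1) 1) := by
            rintro ⟨-, h2, h3⟩
            rw [PySem.List.mem_pyRange_one] at h3
            apply hcw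
            refine ⟨h2, ?_⟩
            rw [hdr] at h3
            simp only [Int.abs_eq_natAbs] at h3 ⊢
            omega
          have h2c : ¬ (r < H ∧ c < W ∧ ((r : Int) - sr) ∈ (d :: t) ∧ |(c : Int) - sc| ≤ 5 - |(r : Int) - sr|) := by
            rintro ⟨-, hw, -, ha⟩; exact hcw ⟨hw, ha⟩
          rw [if_neg h1, if_neg h2c]
          omega
      · have h1 : ¬ (r = ((sr : Int) + d).toNat ∧ c < W ∧ ((c : Int) - sc) ∈ PySem.List.pyRange (-(5 - |d|)) ((5 - |d|) + 1) 1) := by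
          rintro ⟨h1, -, -⟩; exact hdr (by omega)
        have hmem : (((r : Int) - sr) ∈ (d :: t)) ↔ (((r : Int) - sr) ∈ t) := by
          simp only [List.mem_cons, or_iff_right_iff_imp]
          intro hx; exact absurd hx.symm hdr
        rw [if_neg h1]
        simp only [hmem]
        omega
    · rw [if_neg hc]
      rw [ih hnd' _ h]
      congr 1
      by_cases hdr : d = (r : Int) - sr
      · have hrH : ¬ (r < H) := by omega
        simp [hrH]
      · have hmem : (((r : Int) - sr) ∈ (d :: t)) ↔ (((r : Int) - sr) ∈ t) := by
          simp only [List.mem_cons, or_iff_right_iff_imp]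
          intro hx; exact absurd hx.symm hdr
        simp only [hmem]

theorem pvGet2_scatter (H W : Nat) (cs : List (List Int)) (sr sc r c : Nat)
    (h : pvShape H W cs) :
    pvGet2 (pvScatter H W cs sr sc) r c =
      pvGet2 cs r c + (if r < H ∧ c < W ∧ pvNear r c (sr, sc) then 1 else 0) := by
  unfold pvScatter
  rw [pvOuter H W sr sc _ (PySem.List.nodup_pyRange_one _ _) cs h r c]
  congr 1
  by_cases hx : r < H ∧ c < W
  · by_cases hn : |(r : Int) - sr| + |(c : Int) - sc| ≤ 5
    · rw [if_pos, if_pos]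
      · exact ⟨hx.1, hx.2, by simp only [pvNear, decide_eq_true_eq]; exact hn⟩
      · refine ⟨hx.1, hx.2, ?_, by simp only [Int.abs_eq_natAbs] at hn ⊢; omega⟩
        rw [PySem.List.mem_pyRange_one]
        simp only [Int.abs_eq_natAbs] at hn
        omega
    · rw [if_neg, if_neg]
      · rintro ⟨-, -, hn'⟩
        simp only [pvNear, decide_eq_true_eq] at hn'
        exact hn hn'
      · rintro ⟨-, -, hm, habs⟩
        rw [PySem.List.mem_pyRange_one] at hm
        apply hn
        simp only [Int.abs_eq_natAbs] at habs ⊢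
        omega
  · rw [if_neg, if_neg]
    · rintro ⟨a, b, -⟩; exact hx ⟨a, b⟩
    · rintro ⟨a, b, -, -⟩; exact hx ⟨a, b⟩

theorem pvSettle_eq (g : List (List Int)) (H W : Nat) :
    ((List.range H).foldl (fun acc r =>
      (List.range W).foldl (fun acc c =>
        if (g.getD r []).getD c 0 = 1 ∨ (g.getD r []).getD c 0 = 2
        then acc ++ [(r, c)] else acc) acc) ([] : List (Nat × Nat)))
    = (List.range H).flatMap (fun r =>
        ((List.range W).filter (fun c =>
          decide ((g.getD r []).getD c 0 = 1 ∨ (g.getD r []).getD c 0 = 2))).map (fun c => (r, c))) := by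
  rw [PySem.List.foldl_congr_mem
    (g := fun acc r => acc ++ ((List.range W).filter (fun c =>
      decide ((g.getD r []).getD c 0 = 1 ∨ (g.getD r []).getD c 0 = 2))).map (fun c => (r, c)))]
  · rw [PySem.List.foldl_append_eq_flatMap]
    simp
  · intro acc r _
    rw [PySem.List.foldl_append_ite (p := fun c => (g.getD r []).getD c 0 = 1 ∨ (g.getD r []).getD c 0 = 2) (f := fun c => (r, c))]

theorem pvCounts_eq (g : List (List Int)) (H W : Nat) (init : List (List Int)) :
    ((List.range H).foldl (fun cs r =>
      (List.range W).foldl (fun cs c =>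
        if (g.getD r []).getD c 0 = 1 ∨ (g.getD r []).getD c 0 = 2
        then pvScatter H W cs r c else cs) cs) init)
    = ((List.range H).flatMap (fun r =>
        ((List.range W).filter (fun c =>
          decide ((g.getD r []).getD c 0 = 1 ∨ (g.getD r []).getD c 0 = 2))).map (fun c => (r, c)))).foldl
        (fun cs (s : Nat × Nat) => pvScatter H W cs s.1 s.2) init := by
  rw [List.foldl_flatMap]
  apply PySem.List.foldl_congr_mem
  intro acc r _
  rw [List.foldl_map]
  rw [PySem.List.foldl_ite_eq_foldl_filter (p := fun c => (g.getD r []).getD c 0 = 1 ∨ (g.getD r []).getD c 0 = 2)]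

theorem pvGet2_counts (H W : Nat) (S : List (Nat × Nat)) (cs : List (List Int))
    (h : pvShape H W cs) (r c : Nat) :
    pvGet2 (S.foldl (fun cs (s : Nat × Nat) => pvScatter H W cs s.1 s.2) cs) r c
      = pvGet2 cs r c + (if r < H ∧ c < W then (S.countP (pvNear r c) : Int) else 0) := by
  induction S generalizing cs with
  | nil => simp
  | cons s t ih =>
    rw [List.foldl_cons, ih _ (pvShape_scatter H W cs s.1 s.2 h)]
    rw [pvGet2_scatter H W cs s.1 s.2 r c h]
    by_cases hx : r < H ∧ c < W
    · by_cases hn : pvNear r c (s.1, s.2) = true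
      · have : pvNear r c s = true := by simpa using hn
        simp only [hx, hn, and_true, if_pos, if_true, List.countP_cons, this]
        push_cast
        omega
      · have : ¬ pvNear r c s = true := by simpa using hn
        have h3 : ¬ (r < H ∧ c < W ∧ pvNear r c (s.1, s.2) = true) := by
          rintro ⟨-, -, hz⟩; exact hn hz
        simp only [hx, if_pos, if_true, if_neg h3, List.countP_cons, this]
        simp
    · have h3 : ¬ (r < H ∧ c < W ∧ pvNear r c (s.1, s.2) = true) := by
        rintro ⟨a, b, -⟩; exact hx ⟨a, b⟩
      simp only [if_neg hx, if_neg h3]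
      omega

theorem pvGet2_zero (H W r c : Nat) :
    pvGet2 (List.replicate H (List.replicate W (0 : Int))) r c = 0 := by
  simp only [pvGet2, List.getD_eq_getElem?_getD, List.getElem?_replicate]
  split_ifs <;> simp

theorem pvShape_zero (H W : Nat) : pvShape H W (List.replicate H (List.replicate W (0 : Int))) := by
  constructor
  · simp
  · intro row hrow
    rw [List.eq_of_mem_replicate hrow]
    simp

theorem pv_main (g : List (List Int)) :
    precompute_cluster_density_py g = precompute_cluster_density_py_alt g := by
  unfold precompute_cluster_density_py precompute_cluster_density_py_alt
  dsimp only
  rw [pvSettle_eq g g.length (g.getD 0 []).length,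
      pvCounts_eq g g.length (g.getD 0 []).length]
  apply List.map_congr_left
  intro r hr
  apply List.map_congr_left
  intro c hc
  rw [List.mem_range] at hr hc
  rw [pvA_break]
  have hcnt := pvGet2_counts g.length (g.getD 0 []).length
    ((List.range g.length).flatMap (fun r =>
      ((List.range (g.getD 0 []).length).filter (fun c =>
        decide ((g.getD r []).getD c 0 = 1 ∨ (g.getD r []).getD c 0 = 2))).map (fun c => (r, c))))
    (List.replicate g.length (List.replicate (g.getD 0 []).length (0 : Int)))
    (pvShape_zero _ _) r c
  rw [pvGet2_zero, if_pos ⟨hr, hc⟩] at hcnt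
  show decide (2 ≤ _) = decide (_ ≥ 2)
  rw [show ((( (List.range g.length).flatMap (fun r =>
      ((List.range (g.getD 0 []).length).filter (fun c =>
        decide ((g.getD r []).getD c 0 = 1 ∨ (g.getD r []).getD c 0 = 2))).map (fun c => (r, c)))).foldl
      (fun cs (s : Nat × Nat) => pvScatter g.length (g.getD 0 []).length cs s.1 s.2)
      (List.replicate g.length (List.replicate (g.getD 0 []).length (0 : Int)))).getD r []).getD c 0
    = pvGet2 ((( (List.range g.length).flatMap (fun r =>
      ((List.range (g.getD 0 []).length).filter (fun c =>
        decide ((g.getD r []).getD c 0 = 1 ∨ (g.getD r []).getD c 0 = 2))).map (fun c => (r, c)))).foldl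
      (fun cs (s : Nat × Nat) => pvScatter g.length (g.getD 0 []).length cs s.1 s.2)
      (List.replicate g.length (List.replicate (g.getD 0 []).length (0 : Int))))) r c from rfl]
  rw [hcnt]
  rw [decide_eq_decide]
  constructor <;> intro hx
  · omega
  · omega


-- ===== VERDICT (by name: the statement is the Claim_ definition above) =====
theorem precompute_cluster_density_py_spec : Claim_equal_precompute_cluster_density_py := by
  intro initial_grid _ _
  unfold Spec_precompute_cluster_density_py
  exact pv_main initial_grid
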